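-- pv_equiv track=rewrite | github.com/Stannie04/mgaia3 | txt2wad/txt2wad.py | extract_geometry
-- ===== SOURCE A (Python) =====
-- WALL_SET = {1, 3, 13, 14, 15, 16}
--
-- def extract_geometry(grid):
--     """
--     From the grid, extract a set of edges that represent wall cell boundaries.
--     We assume that any cell whose value is in WALL_SET is a wall cell.
--     For each wall cell, we add an edge along any border adjacent to a non‐wall cell.
--
--     Coordinates: cell at (x, y) has its top‐left corner at (x, y);
--     each cell is 1 unit square.
--     """
--     edges = set()
--     height = len(grid)
--     width = len(grid[0]) if height > 0 else 0
--
--     def add_edge(v1, v2):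
--         # Order the two endpoints (as tuples) so that duplicate edges aren’t added.
--         edge = tuple(sorted((v1, v2)))
--         edges.add(edge)
--
--     for y in range(height):
--         for x in range(width):
--             cell = grid[y][x]
--             if cell in WALL_SET:
--                 # Check top edge: if above cell is missing or not a wall.
--                 if y == 0 or grid[y - 1][x] not in WALL_SET:
--                     add_edge((x, y), (x + 1, y))
--                 # Check bottom edge
--                 if y == height - 1 or grid[y + 1][x] not in WALL_SET:
--                     add_edge((x, y + 1), (x + 1, y + 1))
--                 # Check left edge
--                 if x == 0 or grid[y][x - 1] not in WALL_SET:
--                     add_edge((x, y), (x, y + 1))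
--                 # Check right edge
--                 if x == width - 1 or grid[y][x + 1] not in WALL_SET:
--                     add_edge((x + 1, y), (x + 1, y + 1))
--     return edges
-- ===== SOURCE B (Python) =====
-- WALL_SET = {1, 3, 13, 14, 15, 16}
--
-- def extract_geometry(grid):
--     # Different algorithm: no neighbour checks at all.  Count every perimeter
--     # edge of every wall cell; an edge shared by two wall cells is counted
--     # twice and cancels, so the boundary is exactly the edges counted once.
--     height = len(grid)
--     width = len(grid[0]) if height > 0 else 0
--     counts = {}
--     for y in range(height):
--         for x in range(width):
--             if grid[y][x] in WALL_SET:
--                 for e in (((x, y), (x + 1, y)),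
--                           ((x, y + 1), (x + 1, y + 1)),
--                           ((x, y), (x, y + 1)),
--                           ((x + 1, y), (x + 1, y + 1))):
--                     counts[e] = counts.get(e, 0) + 1
--     return {e for e, c in counts.items() if c == 1}
-- ===== Notes on version B (the rewrite author's own statement) =====
-- stated objective: alternative
-- what changed: B does no neighbour inspection at all: instead of A's four boundary-condition/neighbour checks per wall cell, it counts every perimeter edge of every wall cell in a dict, relying on the fact that an edge shared by two wall cells is counted twice and cancels, and returns the edges counted exactly once.
import Mathlib
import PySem

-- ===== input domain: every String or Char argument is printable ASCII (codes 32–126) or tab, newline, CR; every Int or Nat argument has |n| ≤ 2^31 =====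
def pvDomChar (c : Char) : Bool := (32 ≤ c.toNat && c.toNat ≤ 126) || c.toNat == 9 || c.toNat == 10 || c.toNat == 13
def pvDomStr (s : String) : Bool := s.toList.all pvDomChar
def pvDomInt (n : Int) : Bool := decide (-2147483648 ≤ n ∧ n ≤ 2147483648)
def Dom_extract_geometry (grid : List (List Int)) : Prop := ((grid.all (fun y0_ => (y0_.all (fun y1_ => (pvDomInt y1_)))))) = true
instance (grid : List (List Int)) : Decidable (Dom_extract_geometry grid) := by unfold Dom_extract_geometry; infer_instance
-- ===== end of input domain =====

-- B replaces A's per-cell neighbour/boundary checks by a counting algorithm: every perimeter edge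
-- of every wall cell is counted in a dict; edges shared by two wall cells cancel (count 2) and the
-- boundary is the edges counted once (same cost class); the equivalence is about the RETURN value.

-- ===== PORT A =====
-- membership in the module constant WALL_SET = {1, 3, 13, 14, 15, 16}
def pvWall (c : Int) : Bool := c == 1 || c == 3 || c == 13 || c == 14 || c == 15 || c == 16

-- add_edge(v1, v2): endpoints ordered by Python's tuple sort (lexicographic), then set.add
def pvAddEdge (edges : PySem.Set ((Int × Int) × (Int × Int))) (v1 v2 : Int × Int) :
    PySem.Set ((Int × Int) × (Int × Int)) :=
  let edge := if v1.1 < v2.1 ∨ (v1.1 = v2.1 ∧ v1.2 ≤ v2.2) then (v1, v2) else (v2, v1)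
  PySem.Set.add edges edge

-- the body of A's loop over one cell (x, y): the four guarded add_edge calls
def pvCellA (grid : List (List Int)) (height width : Int)
    (edges : PySem.Set ((Int × Int) × (Int × Int))) (x y : Int) :
    PySem.Set ((Int × Int) × (Int × Int)) :=
  let cell := PySem.List.pyGetD (PySem.List.pyGetD grid y []) x 0
  if pvWall cell then
    let edges := if decide (y = 0) || !pvWall (PySem.List.pyGetD (PySem.List.pyGetD grid (y-1) []) x 0) then
      pvAddEdge edges (x, y) (x+1, y) else edges
    let edges := if decide (y = height - 1) || !pvWall (PySem.List.pyGetD (PySem.List.pyGetD grid (y+1) []) x 0) then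
      pvAddEdge edges (x, y+1) (x+1, y+1) else edges
    let edges := if decide (x = 0) || !pvWall (PySem.List.pyGetD (PySem.List.pyGetD grid y []) (x-1) 0) then
      pvAddEdge edges (x, y) (x, y+1) else edges
    let edges := if decide (x = width - 1) || !pvWall (PySem.List.pyGetD (PySem.List.pyGetD grid y []) (x+1) 0) then
      pvAddEdge edges (x+1, y) (x+1, y+1) else edges
    edges
  else edges

def extract_geometry (grid : List (List Int)) : List ((Int × Int) × (Int × Int)) :=
  let height : Int := grid.length
  let width : Int := if 0 < height then ((PySem.List.pyGetD grid 0 []).length : Int) else 0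
  (PySem.List.pyRange 0 height 1).foldl (fun edges y =>
    (PySem.List.pyRange 0 width 1).foldl (fun edges x =>
      pvCellA grid height width edges x y) edges) PySem.Set.empty

-- ===== PORT B =====
-- the tuple of the four perimeter edges of cell (x, y), in B's source order
def pvPerim (x y : Int) : List ((Int × Int) × (Int × Int)) :=
  [((x, y), (x+1, y)), ((x, y+1), (x+1, y+1)), ((x, y), (x, y+1)), ((x+1, y), (x+1, y+1))]

def extract_geometry_alt (grid : List (List Int)) : List ((Int × Int) × (Int × Int)) :=
  let height : Int := grid.length
  let width : Int := if 0 < height then ((PySem.List.pyGetD grid 0 []).length : Int) else 0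
  -- counts[e] = counts.get(e, 0) + 1 over all perimeter edges of all wall cells
  let counts := (PySem.List.pyRange 0 height 1).foldl (fun d y =>
    (PySem.List.pyRange 0 width 1).foldl (fun d x =>
      if pvWall (PySem.List.pyGetD (PySem.List.pyGetD grid y []) x 0) then
        (pvPerim x y).foldl (fun d e => d.modify e 0 (· + 1)) d
      else d) d) (PySem.Dict.empty : PySem.Dict ((Int × Int) × (Int × Int)) Int)
  -- {e for e, c in counts.items() if c == 1}
  counts.items.foldl (fun s ec => if ec.2 == 1 then PySem.Set.add s ec.1 else s) PySem.Set.empty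

-- ===== PRECONDITION & SPEC =====
-- Pre_ excludes exactly the ragged grids (a row shorter than the first row) on which
-- Python A raises IndexError; Python B raises IndexError on those grids as well.
def Pre_extract_geometry (grid : List (List Int)) : Prop :=
  ∀ row ∈ grid, (grid.headD []).length ≤ row.length
instance (grid : List (List Int)) : Decidable (Pre_extract_geometry grid) := by
  unfold Pre_extract_geometry; infer_instance

def pvWitness_extract_geometry : List (List Int) := [[1, 0], [0, 16]]

def Spec_extract_geometry (grid : List (List Int)) (out : List ((Int × Int) × (Int × Int))) : Prop :=
  out = extract_geometry_alt grid
instance (grid : List (List Int)) (out : List ((Int × Int) × (Int × Int))) :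
    Decidable (Spec_extract_geometry grid out) := by unfold Spec_extract_geometry; infer_instance

-- ===== CLAIM (what is proved, stated in full; the proofs are below) =====
def Claim_equal_extract_geometry : Prop := ∀ (grid : List (List Int)), Dom_extract_geometry grid →
  Pre_extract_geometry grid → Spec_extract_geometry grid (extract_geometry grid)

-- ===== LEMMAS AND PROOFS =====

-- canonical "cell (x, y) is a wall cell" predicate (false out of bounds)
def pvW (grid : List (List Int)) (x y : Int) : Bool :=
  decide (0 ≤ x) && decide (x < ((grid.headD []).length : Int)) &&
  decide (0 ≤ y) && decide (y < (grid.length : Int)) &&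
  pvWall (PySem.List.pyGetD (PySem.List.pyGetD grid y []) x 0)

-- the boundary edges contributed by cell (x, y), in the emission order shared by A and B
def pvE (grid : List (List Int)) (x y : Int) : List ((Int × Int) × (Int × Int)) :=
  if pvW grid x y then
    (if !pvW grid x (y-1) then [((x, y), (x+1, y))] else []) ++
    (if !pvW grid x (y+1) then [((x, y+1), (x+1, y+1))] else []) ++
    (if !pvW grid (x-1) y then [((x, y), (x, y+1))] else []) ++
    (if !pvW grid (x+1) y then [((x+1, y), (x+1, y+1))] else [])
  else []

-- all boundary edges, cells in row-major order
def pvL (grid : List (List Int)) : List ((Int × Int) × (Int × Int)) :=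
  (List.range grid.length).flatMap (fun (y : Nat) =>
    (List.range (grid.headD []).length).flatMap (fun (x : Nat) => pvE grid (x : Int) (y : Int)))

-- the perimeter-edge stream counted by B: the four perimeter edges of every wall cell
def pvF (grid : List (List Int)) (x y : Int) : List ((Int × Int) × (Int × Int)) :=
  if pvW grid x y then pvPerim x y else []

def pvP (grid : List (List Int)) : List ((Int × Int) × (Int × Int)) :=
  (List.range grid.length).flatMap (fun (y : Nat) =>
    (List.range (grid.headD []).length).flatMap (fun (x : Nat) => pvF grid (x : Int) (y : Int)))

lemma width_eq (grid : List (List Int)) :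
    (if 0 < ((grid.length : Nat) : Int) then ((PySem.List.pyGetD grid 0 []).length : Int) else 0)
      = ((grid.headD []).length : Int) := by
  cases grid with
  | nil => simp
  | cons a l =>
    rw [if_pos (by exact_mod_cast Nat.succ_pos l.length)]
    have h0 : PySem.List.pyGetD (a :: l) ((0 : Nat) : Int) [] = (a :: l).getD 0 [] :=
      PySem.List.pyGetD_natCast _ _ _
    rw [Nat.cast_zero] at h0
    rw [h0]
    rfl

lemma pvW_in_range (grid : List (List Int)) (x y : Int) (hx0 : 0 ≤ x)
    (hxw : x < ((grid.headD []).length : Int)) (hy0 : 0 ≤ y) (hyh : y < (grid.length : Int)) :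
    pvW grid x y = pvWall (PySem.List.pyGetD (PySem.List.pyGetD grid y []) x 0) := by
  rw [pvW, decide_eq_true hx0, decide_eq_true hxw, decide_eq_true hy0, decide_eq_true hyh]
  simp only [Bool.true_and]

lemma pvAddEdge_h (s : PySem.Set ((Int × Int) × (Int × Int))) (x y : Int) :
    pvAddEdge s (x, y) (x+1, y) = PySem.Set.add s ((x, y), (x+1, y)) := by
  rw [pvAddEdge]
  exact congrArg _ (if_pos (Or.inl (by omega)))

lemma pvAddEdge_v (s : PySem.Set ((Int × Int) × (Int × Int))) (x y : Int) :
    pvAddEdge s (x, y) (x, y+1) = PySem.Set.add s ((x, y), (x, y+1)) := by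
  rw [pvAddEdge]
  exact congrArg _ (if_pos (Or.inr ⟨rfl, by omega⟩))

lemma top_guard (grid : List (List Int)) (xn yn : Nat) (hx : xn < (grid.headD []).length)
    (hy : yn < grid.length) :
    (decide ((yn : Int) = 0) ||
      !pvWall (PySem.List.pyGetD (PySem.List.pyGetD grid ((yn : Int) - 1) []) (xn : Int) 0))
      = !pvW grid (xn : Int) ((yn : Int) - 1) := by
  by_cases h0 : yn = 0
  · subst h0
    rw [decide_eq_true (by norm_num : ((0:Nat) : Int) = 0)]
    rw [pvW, decide_eq_false (by norm_num : ¬ (0:Int) ≤ ((0:Nat):Int) - 1)]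
    simp
  · have hc : ((yn : Int) - 1) = ((yn - 1 : Nat) : Int) := by omega
    rw [decide_eq_false (by omega : ¬ ((yn : Int) = 0)), Bool.false_or, hc,
        pvW_in_range grid _ _ (by omega) (by exact_mod_cast hx) (by omega) (by omega)]

lemma bot_guard (grid : List (List Int)) (xn yn : Nat) (hx : xn < (grid.headD []).length)
    (hy : yn < grid.length) :
    (decide ((yn : Int) = ((grid.length : Nat) : Int) - 1) ||
      !pvWall (PySem.List.pyGetD (PySem.List.pyGetD grid ((yn : Int) + 1) []) (xn : Int) 0))
      = !pvW grid (xn : Int) ((yn : Int) + 1) := by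
  by_cases h0 : yn = grid.length - 1
  · rw [decide_eq_true (by omega : (yn : Int) = ((grid.length : Nat) : Int) - 1)]
    rw [pvW, decide_eq_false (by omega : ¬ ((yn:Int) + 1 < ((grid.length : Nat) : Int)))]
    simp
  · have hc : ((yn : Int) + 1) = ((yn + 1 : Nat) : Int) := by omega
    rw [decide_eq_false (by omega : ¬ ((yn : Int) = ((grid.length : Nat) : Int) - 1)), Bool.false_or, hc,
        pvW_in_range grid _ _ (by omega) (by exact_mod_cast hx) (by omega) (by omega)]

lemma left_guard (grid : List (List Int)) (xn yn : Nat) (hx : xn < (grid.headD []).length)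
    (hy : yn < grid.length) :
    (decide ((xn : Int) = 0) ||
      !pvWall (PySem.List.pyGetD (PySem.List.pyGetD grid (yn : Int) []) ((xn : Int) - 1) 0))
      = !pvW grid ((xn : Int) - 1) (yn : Int) := by
  by_cases h0 : xn = 0
  · subst h0
    rw [decide_eq_true (by norm_num : ((0:Nat) : Int) = 0)]
    rw [pvW, decide_eq_false (by norm_num : ¬ (0:Int) ≤ ((0:Nat):Int) - 1)]
    simp
  · rw [decide_eq_false (by omega : ¬ ((xn : Int) = 0)), Bool.false_or,
        pvW_in_range grid _ _ (by omega) (by omega) (by omega) (by omega)]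

lemma right_guard (grid : List (List Int)) (xn yn : Nat) (hx : xn < (grid.headD []).length)
    (hy : yn < grid.length) :
    (decide ((xn : Int) = ((grid.headD []).length : Int) - 1) ||
      !pvWall (PySem.List.pyGetD (PySem.List.pyGetD grid (yn : Int) []) ((xn : Int) + 1) 0))
      = !pvW grid ((xn : Int) + 1) (yn : Int) := by
  by_cases h0 : xn = (grid.headD []).length - 1
  · rw [decide_eq_true (by omega : (xn : Int) = ((grid.headD []).length : Int) - 1)]
    rw [pvW, decide_eq_false (by omega : ¬ ((xn:Int) + 1 < ((grid.headD []).length : Int)))]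
    simp
  · rw [decide_eq_false (by omega : ¬ ((xn : Int) = ((grid.headD []).length : Int) - 1)), Bool.false_or,
        pvW_in_range grid _ _ (by omega) (by omega) (by omega) (by omega)]

lemma a_body (grid : List (List Int)) (xn yn : Nat) (hx : xn < (grid.headD []).length)
    (hy : yn < grid.length) (s : PySem.Set ((Int × Int) × (Int × Int))) :
    pvCellA grid ((grid.length : Nat) : Int) ((grid.headD []).length : Int) s (xn : Int) (yn : Int)
      = (pvE grid (xn : Int) (yn : Int)).foldl PySem.Set.add s := by
  unfold pvCellA
  simp only [top_guard grid xn yn hx hy, bot_guard grid xn yn hx hy,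
    left_guard grid xn yn hx hy, right_guard grid xn yn hx hy,
    pvAddEdge_h, pvAddEdge_v,
    ← pvW_in_range grid (xn : Int) (yn : Int) (by omega) (by exact_mod_cast hx) (by omega) (by exact_mod_cast hy)]
  rw [pvE]
  by_cases hw : pvW grid (xn : Int) (yn : Int)
  · rw [if_pos hw, if_pos hw]
    split_ifs <;> simp
  · rw [if_neg (by simp [hw]), if_neg (by simp [hw])]
    simp

theorem extract_geometry_eq (grid : List (List Int)) :
    extract_geometry grid = List.foldl PySem.Set.add [] (pvL grid) := by
  show (PySem.List.pyRange 0 (grid.length : Int) 1).foldl (fun edges y =>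
        (PySem.List.pyRange 0 (if 0 < ((grid.length : Nat) : Int) then ((PySem.List.pyGetD grid 0 []).length : Int) else 0) 1).foldl (fun edges x =>
          pvCellA grid (grid.length : Int) (if 0 < ((grid.length : Nat) : Int) then ((PySem.List.pyGetD grid 0 []).length : Int) else 0)
            edges x y) edges) PySem.Set.empty
      = List.foldl PySem.Set.add [] (pvL grid)
  rw [width_eq]
  rw [PySem.List.pyRange_zero_natCast grid.length, List.foldl_map]
  refine Eq.trans (PySem.List.foldl_congr_mem _ _
    (fun s (yn : Nat) => List.foldl PySem.Set.add s ((List.range (grid.headD []).length).flatMap (fun (xn : Nat) => pvE grid (xn : Int) (yn : Int)))) _ ?_) ?_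
  · intro s yn hyn
    have hy : yn < grid.length := List.mem_range.mp hyn
    rw [PySem.List.pyRange_zero_natCast, List.foldl_map]
    refine Eq.trans (PySem.List.foldl_congr_mem _ _
      (fun s (xn : Nat) => (pvE grid (xn : Int) (yn : Int)).foldl PySem.Set.add s) _
      (fun s xn hxn => a_body grid xn yn (List.mem_range.mp hxn) hy s)) ?_
    rw [← List.foldl_flatMap]
  · rw [← List.foldl_flatMap, pvL]
    rfl

-- ---- B side ----

lemma b_body (grid : List (List Int)) (xn yn : Nat) (hx : xn < (grid.headD []).length)
    (hy : yn < grid.length) (d : PySem.Dict ((Int × Int) × (Int × Int)) Int) :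
    (if pvWall (PySem.List.pyGetD (PySem.List.pyGetD grid (yn : Int) []) (xn : Int) 0) then
        (pvPerim (xn : Int) (yn : Int)).foldl (fun d e => d.modify e 0 (· + 1)) d
      else d)
      = (pvF grid (xn : Int) (yn : Int)).foldl (fun d e => d.modify e 0 (· + 1)) d := by
  rw [pvF, ← pvW_in_range grid (xn : Int) (yn : Int) (by omega) (by exact_mod_cast hx)
      (by omega) (by exact_mod_cast hy)]
  by_cases hw : pvW grid (xn : Int) (yn : Int) <;> simp [hw]

theorem counts_eq (grid : List (List Int)) :
    (PySem.List.pyRange 0 ((grid.length : Nat) : Int) 1).foldl (fun d y =>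
      (PySem.List.pyRange 0 (if 0 < ((grid.length : Nat) : Int) then ((PySem.List.pyGetD grid 0 []).length : Int) else 0) 1).foldl (fun d x =>
        if pvWall (PySem.List.pyGetD (PySem.List.pyGetD grid y []) x 0) then
          (pvPerim x y).foldl (fun d e => d.modify e 0 (· + 1)) d
        else d) d) PySem.Dict.empty
      = PySem.Dict.counter (pvP grid) := by
  rw [width_eq]
  rw [PySem.Dict.counter_eq_foldl, pvP, List.foldl_flatMap]
  rw [PySem.List.pyRange_zero_natCast grid.length, List.foldl_map]
  refine PySem.List.foldl_congr_mem _ _ _ _ ?_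
  intro d yn hyn
  have hy : yn < grid.length := List.mem_range.mp hyn
  rw [PySem.List.pyRange_zero_natCast, List.foldl_map, List.foldl_flatMap]
  refine PySem.List.foldl_congr_mem _ _ _ _ ?_
  intro d xn hxn
  exact b_body grid xn yn (List.mem_range.mp hxn) hy d

-- the final set comprehension: a guarded fold of adds is Set.update with a filter
lemma foldl_guard_add {α : Type} [BEq α] (p : α → Bool) (l : List α) (s : PySem.Set α) :
    l.foldl (fun s k => if p k then PySem.Set.add s k else s) s
      = PySem.Set.update s (l.filter p) := by
  induction l generalizing s with
  | nil => rfl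
  | cons a t ih =>
    by_cases hp : p a <;> simp [hp, ih, PySem.Set.update]

-- filter distributes over flatMap
lemma filter_flatMap {α β : Type} (p : β → Bool) (f : α → List β) (l : List α) :
    (l.flatMap f).filter p = l.flatMap (fun x => (f x).filter p) := by
  induction l with
  | nil => rfl
  | cons a t ih => simp [List.flatMap_cons, List.filter_append, ih]

-- dedup commutes with filtering by a predicate that only holds on count-1 elements
lemma filter_ofList {α : Type} [BEq α] [LawfulBEq α] (p : α → Bool) (P : List α)
    (hp : ∀ e, p e = true → P.count e ≤ 1) :
    (PySem.Set.ofList P).filter p = P.filter p := by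
  induction P using List.reverseRecOn with
  | nil => rfl
  | append_singleton Q a ih =>
    have hq : ∀ e, p e = true → Q.count e ≤ 1 := by
      intro e he
      have := hp e he
      rw [List.count_append] at this
      omega
    have hofl : PySem.Set.ofList (Q ++ [a]) = PySem.Set.add (PySem.Set.ofList Q) a := by
      rw [PySem.Set.ofList_eq_foldl, PySem.Set.ofList_eq_foldl, List.foldl_append]
      rfl
    by_cases hmem : a ∈ Q
    · have hnp : p a = false := by
        by_contra h
        have hpa : p a = true := by revert h; cases p a <;> simp
        have := hp a hpa
        rw [List.count_append] at this
        have h1 : List.count a [a] = 1 := by simp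
        have h2 : 0 < List.count a Q := List.count_pos_iff.mpr hmem
        omega
      have hadd : PySem.Set.add (PySem.Set.ofList Q) a = PySem.Set.ofList Q := by
        rw [PySem.Set.add]
        rw [if_pos (by simp [PySem.Set.contains, PySem.Set.mem_ofList, hmem])]
      rw [hofl, hadd, List.filter_append, ih hq]
      simp [hnp]
    · have hadd : PySem.Set.add (PySem.Set.ofList Q) a = PySem.Set.ofList Q ++ [a] := by
        rw [PySem.Set.add]
        rw [if_neg (by simp [PySem.Set.contains, PySem.Set.mem_ofList, hmem])]
      rw [hofl, hadd, List.filter_append, List.filter_append, ih hq]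

-- ---- counting lemmas ----

-- occurrences of a horizontal edge in the perimeter list of one cell
lemma count_perim_h (x' y' x y : Int) :
    (pvPerim x' y').count ((x, y), (x+1, y))
      = (if x' = x ∧ y' = y then 1 else 0) + (if x' = x ∧ y' = y - 1 then 1 else 0) := by
  simp only [pvPerim, List.count_cons, List.count_nil, beq_iff_eq, Prod.mk.injEq]
  split_ifs <;> omega

-- occurrences of a vertical edge in the perimeter list of one cell
lemma count_perim_v (x' y' x y : Int) :
    (pvPerim x' y').count ((x, y), (x, y+1))
      = (if x' = x ∧ y' = y then 1 else 0) + (if x' = x - 1 ∧ y' = y then 1 else 0) := by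
  simp only [pvPerim, List.count_cons, List.count_nil, beq_iff_eq, Prod.mk.injEq]
  split_ifs <;> omega

lemma count_pvP (grid : List (List Int)) (e : (Int × Int) × (Int × Int)) :
    (pvP grid).count e
      = ((List.range grid.length).map (fun yn : Nat =>
          ((List.range (grid.headD []).length).map (fun xn : Nat =>
            (pvF grid ((xn : Nat) : Int) ((yn : Nat) : Int)).count e)).sum)).sum := by
  rw [pvP, List.count_flatMap]
  congr 1
  refine List.map_congr_left fun yn _ => ?_
  simp only [Function.comp_apply]
  rw [List.count_flatMap]
  exact congrArg List.sum (List.map_congr_left fun xn _ => rfl)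

-- sum over range of a function supported on at most one index
lemma sum_range_single (n k : Nat) (f : Nat → Nat)
    (h : ∀ i, i < n → i ≠ k → f i = 0) :
    ((List.range n).map f).sum = if k < n then f k else 0 := by
  induction n with
  | zero => simp
  | succ m ih =>
    rw [List.range_succ, List.map_append, List.sum_append,
        ih (fun i hi => h i (Nat.lt_succ_of_lt hi))]
    simp only [List.map_cons, List.map_nil, List.sum_cons, List.sum_nil, Nat.add_zero]
    by_cases hk : k = m
    · rw [if_neg (by omega), if_pos (by omega), hk]
      try omega
    · rw [h m (by omega) (fun hh => hk hh.symm)]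
      by_cases hk2 : k < m
      · rw [if_pos hk2, if_pos (by omega)]
        try omega
      · rw [if_neg hk2, if_neg (by omega)]
        try omega

-- sum over range of a function supported on at most two indices
lemma sum_range_double (n k1 k2 : Nat) (hk : k1 ≠ k2) (f : Nat → Nat)
    (h : ∀ i, i < n → i ≠ k1 → i ≠ k2 → f i = 0) :
    ((List.range n).map f).sum
      = (if k1 < n then f k1 else 0) + (if k2 < n then f k2 else 0) := by
  have hfe : ∀ i ∈ List.range n,
      f i = (fun i => (if i = k1 then f k1 else 0) + (if i = k2 then f k2 else 0)) i := by
    intro i hi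
    show f i = (if i = k1 then f k1 else 0) + (if i = k2 then f k2 else 0)
    rcases eq_or_ne i k1 with rfl | h1
    · rw [if_pos rfl, if_neg hk]
      omega
    · rcases eq_or_ne i k2 with rfl | h2
      · rw [if_neg h1, if_pos rfl]
        omega
      · rw [h i (List.mem_range.mp hi) h1 h2, if_neg h1, if_neg h2]
  rw [List.map_congr_left hfe, List.sum_map_add,
      sum_range_single n k1 _ (fun i _ hne => if_neg hne),
      sum_range_single n k2 _ (fun i _ hne => if_neg hne)]
  simp

-- shorthand for "wall contributes 1"
def pvW01 (grid : List (List Int)) (x y : Int) : Nat := if pvW grid x y then 1 else 0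

lemma count_pvF_h (grid : List (List Int)) (x' y' x y : Int) :
    (pvF grid x' y').count ((x, y), (x+1, y))
      = (if x' = x ∧ y' = y then pvW01 grid x y else 0)
        + (if x' = x ∧ y' = y - 1 then pvW01 grid x (y-1) else 0) := by
  rw [pvF]
  by_cases hw : pvW grid x' y'
  · rw [if_pos hw, count_perim_h]
    congr 1
    · by_cases h1 : x' = x ∧ y' = y
      · rw [if_pos h1, if_pos h1, pvW01, ← h1.1, ← h1.2, if_pos hw]
      · rw [if_neg h1, if_neg h1]
    · by_cases h2 : x' = x ∧ y' = y - 1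
      · rw [if_pos h2, if_pos h2, pvW01, ← h2.1, ← h2.2, if_pos hw]
      · rw [if_neg h2, if_neg h2]
  · rw [if_neg hw, List.count_nil]
    have z1 : (if x' = x ∧ y' = y then pvW01 grid x y else 0) = 0 := by
      by_cases h1 : x' = x ∧ y' = y
      · rw [if_pos h1, pvW01, ← h1.1, ← h1.2, if_neg hw]
      · rw [if_neg h1]
    have z2 : (if x' = x ∧ y' = y - 1 then pvW01 grid x (y-1) else 0) = 0 := by
      by_cases h2 : x' = x ∧ y' = y - 1
      · rw [if_pos h2, pvW01, ← h2.1, ← h2.2, if_neg hw]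
      · rw [if_neg h2]
    rw [z1, z2]

lemma count_pvF_v (grid : List (List Int)) (x' y' x y : Int) :
    (pvF grid x' y').count ((x, y), (x, y+1))
      = (if x' = x ∧ y' = y then pvW01 grid x y else 0)
        + (if x' = x - 1 ∧ y' = y then pvW01 grid (x-1) y else 0) := by
  rw [pvF]
  by_cases hw : pvW grid x' y'
  · rw [if_pos hw, count_perim_v]
    congr 1
    · by_cases h1 : x' = x ∧ y' = y
      · rw [if_pos h1, if_pos h1, pvW01, ← h1.1, ← h1.2, if_pos hw]
      · rw [if_neg h1, if_neg h1]
    · by_cases h2 : x' = x - 1 ∧ y' = y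
      · rw [if_pos h2, if_pos h2, pvW01, ← h2.1, ← h2.2, if_pos hw]
      · rw [if_neg h2, if_neg h2]
  · rw [if_neg hw, List.count_nil]
    have z1 : (if x' = x ∧ y' = y then pvW01 grid x y else 0) = 0 := by
      by_cases h1 : x' = x ∧ y' = y
      · rw [if_pos h1, pvW01, ← h1.1, ← h1.2, if_neg hw]
      · rw [if_neg h1]
    have z2 : (if x' = x - 1 ∧ y' = y then pvW01 grid (x-1) y else 0) = 0 := by
      by_cases h2 : x' = x - 1 ∧ y' = y
      · rw [if_pos h2, pvW01, ← h2.1, ← h2.2, if_neg hw]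
      · rw [if_neg h2]
    rw [z1, z2]

-- pvW01 vanishes outside the grid
lemma pvW01_oob_y (grid : List (List Int)) (x y : Int)
    (h : y < 0 ∨ (grid.length : Int) ≤ y) : pvW01 grid x y = 0 := by
  rcases h with h | h
  · rw [pvW01, pvW, decide_eq_false (by omega : ¬ (0:Int) ≤ y)]
    simp
  · rw [pvW01, pvW, decide_eq_false (by omega : ¬ y < (grid.length : Int))]
    simp

lemma pvW01_oob_x (grid : List (List Int)) (x y : Int)
    (h : x < 0 ∨ ((grid.headD []).length : Int) ≤ x) : pvW01 grid x y = 0 := by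
  rcases h with h | h
  · rw [pvW01, pvW, decide_eq_false (by omega : ¬ (0:Int) ≤ x)]
    simp
  · rw [pvW01, pvW, decide_eq_false (by omega : ¬ x < ((grid.headD []).length : Int))]
    simp

-- the column sum of per-cell counts of a fixed edge, as a function of the row index
lemma inner_sum_h (grid : List (List Int)) (xn : Nat) (hx : xn < (grid.headD []).length)
    (y : Int) (yn' : Nat) :
    ((List.range (grid.headD []).length).map (fun xn' : Nat =>
        (pvF grid ((xn' : Nat) : Int) ((yn' : Nat) : Int)).count
          (((xn : Int), y), ((xn : Int) + 1, y)))).sum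
      = (if (yn' : Int) = y then pvW01 grid (xn : Int) y else 0)
        + (if (yn' : Int) = y - 1 then pvW01 grid (xn : Int) (y-1) else 0) := by
  rw [sum_range_single (grid.headD []).length xn _ ?side]
  case side =>
    intro i hi hne
    rw [count_pvF_h]
    rw [if_neg (fun hh => hne (by exact_mod_cast hh.1)),
        if_neg (fun hh => hne (by exact_mod_cast hh.1))]
  rw [if_pos hx, count_pvF_h]
  congr 1
  · by_cases h1 : (yn' : Int) = y
    · rw [if_pos ⟨rfl, h1⟩, if_pos h1]
    · rw [if_neg (fun hh => h1 hh.2), if_neg h1]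
  · by_cases h2 : (yn' : Int) = y - 1
    · rw [if_pos ⟨rfl, h2⟩, if_pos h2]
    · rw [if_neg (fun hh => h2 hh.2), if_neg h2]

-- count of the top edge of cell (xn, yn) in the whole perimeter stream
lemma count_P_h (grid : List (List Int)) (xn yn : Nat) (hx : xn < (grid.headD []).length)
    (hy : yn < grid.length) :
    (pvP grid).count (((xn : Int), (yn : Int)), ((xn : Int) + 1, (yn : Int)))
      = pvW01 grid (xn : Int) ((yn : Int) - 1) + pvW01 grid (xn : Int) (yn : Int) := by
  rw [count_pvP]
  refine Eq.trans (congrArg List.sum (List.map_congr_left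
    (fun yn' _ => inner_sum_h grid xn hx ((yn : Int)) yn'))) ?_
  by_cases h0 : yn = 0
  · subst h0
    rw [sum_range_single grid.length 0 _ ?side0]
    case side0 =>
      intro i hi hne
      rw [if_neg (by omega), if_neg (by omega)]
    rw [pvW01_oob_y grid ((xn : Int)) ((((0:Nat) : Int)) - 1) (Or.inl (by omega))]
    split_ifs <;> omega
  · rw [sum_range_double grid.length yn (yn - 1) (by omega) _ ?side1]
    case side1 =>
      intro i hi h1 h2
      rw [if_neg (by omega), if_neg (by omega)]
    split_ifs <;> omega

-- count of the bottom edge of cell (xn, yn)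
lemma count_P_h' (grid : List (List Int)) (xn yn : Nat) (hx : xn < (grid.headD []).length)
    (hy : yn < grid.length) :
    (pvP grid).count (((xn : Int), (yn : Int) + 1), ((xn : Int) + 1, (yn : Int) + 1))
      = pvW01 grid (xn : Int) (yn : Int) + pvW01 grid (xn : Int) ((yn : Int) + 1) := by
  rw [count_pvP]
  refine Eq.trans (congrArg List.sum (List.map_congr_left
    (fun yn' _ => inner_sum_h grid xn hx ((yn : Int) + 1) yn'))) ?_
  rw [sum_range_double grid.length (yn + 1) yn (by omega) _ ?side]
  case side =>
    intro i hi h1 h2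
    rw [if_neg (by omega), if_neg (by omega)]
  rw [show ((yn : Int) + 1 - 1) = (yn : Int) by ring]
  by_cases hv : yn + 1 < grid.length
  · split_ifs <;> omega
  · rw [pvW01_oob_y grid ((xn : Int)) ((yn : Int) + 1) (Or.inr (by omega))]
    split_ifs <;> omega

-- count of the left edge of cell (xn, yn)
lemma count_P_v (grid : List (List Int)) (xn yn : Nat) (hx : xn < (grid.headD []).length)
    (hy : yn < grid.length) :
    (pvP grid).count (((xn : Int), (yn : Int)), ((xn : Int), (yn : Int) + 1))
      = pvW01 grid ((xn : Int) - 1) (yn : Int) + pvW01 grid (xn : Int) (yn : Int) := by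
  rw [count_pvP]
  have hinner : ∀ yn' ∈ List.range grid.length,
      ((List.range (grid.headD []).length).map (fun xn' : Nat =>
        (pvF grid ((xn' : Nat) : Int) ((yn' : Nat) : Int)).count
          (((xn : Int), (yn : Int)), ((xn : Int), (yn : Int) + 1)))).sum
      = if yn' = yn then pvW01 grid ((xn : Int) - 1) (yn : Int) + pvW01 grid (xn : Int) (yn : Int) else 0 := by
    intro yn' _
    by_cases hv : yn' = yn
    · subst hv
      rw [if_pos rfl]
      by_cases h0 : xn = 0
      · subst h0
        rw [sum_range_single (grid.headD []).length 0 _ ?s1]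
        case s1 =>
          intro i hi hne
          rw [count_pvF_v, if_neg (by rintro ⟨hh, -⟩; omega), if_neg (by rintro ⟨hh, -⟩; omega)]
        rw [count_pvF_v]
        rw [pvW01_oob_x grid ((((0:Nat) : Int)) - 1) ((yn' : Int)) (Or.inl (by omega))]
        split_ifs <;> omega
      · rw [sum_range_double (grid.headD []).length xn (xn - 1) (by omega) _ ?s2]
        case s2 =>
          intro i hi h1 h2
          rw [count_pvF_v, if_neg (by rintro ⟨hh, -⟩; omega), if_neg (by rintro ⟨hh, -⟩; omega)]
        rw [count_pvF_v, count_pvF_v]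
        split_ifs <;> omega
    · rw [if_neg hv]
      apply List.sum_eq_zero
      intro t ht
      obtain ⟨i, hi, rfl⟩ := List.mem_map.mp ht
      rw [count_pvF_v, if_neg (by rintro ⟨-, hh⟩; omega), if_neg (by rintro ⟨-, hh⟩; omega)]
      rfl
  refine Eq.trans (congrArg List.sum (List.map_congr_left hinner)) ?_
  rw [sum_range_single grid.length yn _ (fun i _ hne => if_neg hne)]
  rw [if_pos hy, if_pos rfl]

-- count of the right edge of cell (xn, yn)
lemma count_P_v' (grid : List (List Int)) (xn yn : Nat) (hx : xn < (grid.headD []).length)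
    (hy : yn < grid.length) :
    (pvP grid).count (((xn : Int) + 1, (yn : Int)), ((xn : Int) + 1, (yn : Int) + 1))
      = pvW01 grid (xn : Int) (yn : Int) + pvW01 grid ((xn : Int) + 1) (yn : Int) := by
  rw [count_pvP]
  have hinner : ∀ yn' ∈ List.range grid.length,
      ((List.range (grid.headD []).length).map (fun xn' : Nat =>
        (pvF grid ((xn' : Nat) : Int) ((yn' : Nat) : Int)).count
          (((xn : Int) + 1, (yn : Int)), ((xn : Int) + 1, (yn : Int) + 1)))).sum
      = if yn' = yn then pvW01 grid (xn : Int) (yn : Int) + pvW01 grid ((xn : Int) + 1) (yn : Int) else 0 := by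
    intro yn' _
    by_cases hv : yn' = yn
    · subst hv
      rw [if_pos rfl]
      by_cases hw2 : xn + 1 < (grid.headD []).length
      · rw [sum_range_double (grid.headD []).length (xn + 1) xn (by omega) _ ?s1]
        case s1 =>
          intro i hi h1 h2
          rw [count_pvF_v, if_neg (by rintro ⟨hh, -⟩; omega), if_neg (by rintro ⟨hh, -⟩; omega)]
        rw [count_pvF_v, count_pvF_v]
        rw [show ((xn : Int) + 1 - 1) = (xn : Int) by ring]
        split_ifs <;> omega
      · rw [sum_range_single (grid.headD []).length xn _ ?s2]
        case s2 =>
          intro i hi hne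
          rw [count_pvF_v, if_neg (by rintro ⟨hh, -⟩; omega), if_neg (by rintro ⟨hh, -⟩; omega)]
        rw [count_pvF_v]
        rw [show ((xn : Int) + 1 - 1) = (xn : Int) by ring]
        rw [pvW01_oob_x grid ((xn : Int) + 1) ((yn' : Int)) (Or.inr (by omega))]
        split_ifs <;> omega
    · rw [if_neg hv]
      apply List.sum_eq_zero
      intro t ht
      obtain ⟨i, hi, rfl⟩ := List.mem_map.mp ht
      rw [count_pvF_v, if_neg (by rintro ⟨-, hh⟩; omega), if_neg (by rintro ⟨-, hh⟩; omega)]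
      rfl
  refine Eq.trans (congrArg List.sum (List.map_congr_left hinner)) ?_
  rw [sum_range_single grid.length yn _ (fun i _ hne => if_neg hne)]
  rw [if_pos hy, if_pos rfl]

-- every edge the final comprehension keeps occurs once in the stream
lemma count_le_one_of_p (grid : List (List Int)) (e : (Int × Int) × (Int × Int))
    (h : ((((pvP grid).count e : Int) == 1) : Bool) = true) : (pvP grid).count e ≤ 1 := by
  have : ((pvP grid).count e : Int) = 1 := by exact_mod_cast eq_of_beq h
  omega

-- per cell, the count-1 filter of the perimeter list is A's guarded emission
lemma filter_pvF (grid : List (List Int)) (xn yn : Nat) (hx : xn < (grid.headD []).length)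
    (hy : yn < grid.length) :
    (pvF grid (xn : Int) (yn : Int)).filter (fun e => (((pvP grid).count e : Int) == 1))
      = pvE grid (xn : Int) (yn : Int) := by
  rw [pvF, pvE]
  by_cases hw : pvW grid (xn : Int) (yn : Int)
  · rw [if_pos hw, if_pos hw]
    have hw1 : pvW01 grid (xn : Int) (yn : Int) = 1 := by rw [pvW01, if_pos hw]
    have h1 : (((pvP grid).count (((xn : Int), (yn : Int)), ((xn : Int) + 1, (yn : Int))) : Int) == 1)
        = !pvW grid (xn : Int) ((yn : Int) - 1) := by
      rw [count_P_h grid xn yn hx hy, hw1]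
      cases hb : pvW grid (xn : Int) ((yn : Int) - 1) <;> simp [pvW01, hb]
    have h2 : (((pvP grid).count (((xn : Int), (yn : Int) + 1), ((xn : Int) + 1, (yn : Int) + 1)) : Int) == 1)
        = !pvW grid (xn : Int) ((yn : Int) + 1) := by
      rw [count_P_h' grid xn yn hx hy, hw1]
      cases hb : pvW grid (xn : Int) ((yn : Int) + 1) <;> simp [pvW01, hb]
    have h3 : (((pvP grid).count (((xn : Int), (yn : Int)), ((xn : Int), (yn : Int) + 1)) : Int) == 1)
        = !pvW grid ((xn : Int) - 1) (yn : Int) := by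
      rw [count_P_v grid xn yn hx hy, hw1]
      cases hb : pvW grid ((xn : Int) - 1) (yn : Int) <;> simp [pvW01, hb]
    have h4 : (((pvP grid).count (((xn : Int) + 1, (yn : Int)), ((xn : Int) + 1, (yn : Int) + 1)) : Int) == 1)
        = !pvW grid ((xn : Int) + 1) (yn : Int) := by
      rw [count_P_v' grid xn yn hx hy, hw1]
      cases hb : pvW grid ((xn : Int) + 1) (yn : Int) <;> simp [pvW01, hb]
    rw [pvPerim]
    simp only [List.filter_cons, List.filter_nil, h1, h2, h3, h4]
    cases pvW grid (xn : Int) ((yn : Int) - 1) <;>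
      cases pvW grid (xn : Int) ((yn : Int) + 1) <;>
      cases pvW grid ((xn : Int) - 1) (yn : Int) <;>
      cases pvW grid ((xn : Int) + 1) (yn : Int) <;> simp
  · rw [if_neg hw, if_neg hw, List.filter_nil]

-- the boundary list is exactly the count-1 filter of the stream
theorem filter_pvP (grid : List (List Int)) :
    (pvP grid).filter (fun e => (((pvP grid).count e : Int) == 1)) = pvL grid := by
  conv_lhs => rw [pvP]
  rw [filter_flatMap, pvL]
  refine List.flatMap_congr fun yn hyn => ?_
  rw [filter_flatMap]
  refine List.flatMap_congr fun xn hxn => ?_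
  exact filter_pvF grid xn yn (List.mem_range.mp hxn) (List.mem_range.mp hyn)

theorem extract_geometry_alt_eq (grid : List (List Int)) :
    extract_geometry_alt grid = PySem.Set.ofList (pvL grid) := by
  show ((PySem.List.pyRange 0 ((grid.length : Nat) : Int) 1).foldl (fun d y =>
      (PySem.List.pyRange 0 (if 0 < ((grid.length : Nat) : Int) then ((PySem.List.pyGetD grid 0 []).length : Int) else 0) 1).foldl (fun d x =>
        if pvWall (PySem.List.pyGetD (PySem.List.pyGetD grid y []) x 0) then
          (pvPerim x y).foldl (fun d e => d.modify e 0 (· + 1)) d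
        else d) d) (PySem.Dict.empty : PySem.Dict ((Int × Int) × (Int × Int)) Int)).items.foldl
      (fun s ec => if ec.2 == 1 then PySem.Set.add s ec.1 else s) PySem.Set.empty
    = PySem.Set.ofList (pvL grid)
  rw [counts_eq grid, PySem.Dict.items_counter, List.foldl_map]
  have hfold :
      (PySem.Set.ofList (pvP grid)).foldl
        (fun s k => if (((pvP grid).count k : Int) == 1) then PySem.Set.add s k else s)
        PySem.Set.empty
      = PySem.Set.update PySem.Set.empty
          ((PySem.Set.ofList (pvP grid)).filter (fun k => (((pvP grid).count k : Int) == 1))) :=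
    foldl_guard_add _ _ _
  rw [hfold, filter_ofList _ _ (fun e he => count_le_one_of_p grid e he), filter_pvP]
  exact PySem.Set.update_nil_left _

-- ===== VERDICT (by name: the statement is the Claim_ definition above) =====
theorem extract_geometry_spec : Claim_equal_extract_geometry := by
  intro grid _ _
  unfold Spec_extract_geometry
  rw [extract_geometry_eq, extract_geometry_alt_eq, PySem.Set.ofList_eq_foldl]
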